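-- pv_equiv track=rewrite | github.com/Artemius18/3_course | 2term/InformationSecurity/Lab8/Merkle-Hellman.py | generate_superincreasing_sequence
-- ===== SOURCE A (Python) =====
-- def generate_superincreasing_sequence(n, m):
--     max_number = 2 ** m
--     sequence = []
--     sum = 0
--     next = 2
--
--     for i in range(n):
--         sequence.append(next)
--         sum += next + 1
--         next = sum
--
--     return sequence
-- ===== SOURCE B (Python) =====
-- def generate_superincreasing_sequence(n, m):
--     # closed form: element 0 is the seed 2, element i (i>=1) is 2**(i+1) - 1; m is unused, as in the original
--     return [2 if i == 0 else (1 << (i + 1)) - 1 for i in range(n)]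
-- ===== Notes on version B (the rewrite author's own statement) =====
-- stated objective: simpler
-- what changed: Replaces the accumulator loop carrying (sequence, running sum, next) with a one-line closed-form comprehension computing each element directly from its index (2 for index 0, 2**(i+1)-1 otherwise).
import Mathlib
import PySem

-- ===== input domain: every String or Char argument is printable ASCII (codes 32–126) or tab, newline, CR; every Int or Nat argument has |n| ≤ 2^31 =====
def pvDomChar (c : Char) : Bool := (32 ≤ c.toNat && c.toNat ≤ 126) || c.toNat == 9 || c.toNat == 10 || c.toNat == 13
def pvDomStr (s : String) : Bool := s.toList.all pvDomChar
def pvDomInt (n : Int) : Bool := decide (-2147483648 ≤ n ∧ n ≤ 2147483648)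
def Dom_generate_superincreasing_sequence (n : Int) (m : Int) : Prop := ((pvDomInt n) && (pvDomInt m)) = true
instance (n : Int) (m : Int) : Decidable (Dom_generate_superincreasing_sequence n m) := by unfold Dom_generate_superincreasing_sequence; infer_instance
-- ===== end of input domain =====

-- ===== PORT A =====
-- B replaces A's running-sum accumulator loop with a closed-form per-index comprehension (objective: simpler).
-- max_number = 2**m is dead code in A (never read); ported as a discarded let (Python yields a float for m < 0, unused either way).
def generate_superincreasing_sequence (n : Int) (m : Int) : List Int :=
  let _max_number : Int := 2 ^ m.toNat
  let st :=
    (PySem.List.pyRange 0 n 1).foldl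
      (fun (st : List Int × Int × Int) _i =>
        let sequence := st.1
        let sum := st.2.1
        let next := st.2.2
        (sequence ++ [next], sum + next + 1, sum + next + 1))
      ([], 0, 2)
  st.1

-- ===== PORT B =====
def generate_superincreasing_sequence_alt (n : Int) (m : Int) : List Int :=
  (PySem.List.pyRange 0 n 1).map (fun (i : Int) => if i = 0 then 2 else ((1 : Int) <<< (i + 1).toNat) - 1)

-- ===== PRECONDITION & SPEC =====
def Spec_generate_superincreasing_sequence (n : Int) (m : Int) (out : List Int) : Prop := out = generate_superincreasing_sequence_alt n m
instance (n : Int) (m : Int) (out : List Int) : Decidable (Spec_generate_superincreasing_sequence n m out) := by unfold Spec_generate_superincreasing_sequence; infer_instance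

-- ===== CLAIM (what is proved, stated in full; the proofs are below) =====
def Claim_equal_generate_superincreasing_sequence : Prop := ∀ (n : Int) (m : Int), Dom_generate_superincreasing_sequence n m → Spec_generate_superincreasing_sequence n m (generate_superincreasing_sequence n m)

-- ===== LEMMAS AND PROOFS =====
def pvStep (st : List Int × Int × Int) (_i : Int) : List Int × Int × Int :=
  let sequence := st.1
  let sum := st.2.1
  let next := st.2.2
  (sequence ++ [next], sum + next + 1, sum + next + 1)

theorem pv_loop_inv (k : Nat) :
    (PySem.List.pyRange 0 (k : Int) 1).foldl pvStep ([], 0, 2) =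
      ((List.range k).map (fun i : Nat => if i = 0 then (2 : Int) else 2 ^ (i + 1) - 1),
       (if k = 0 then 0 else 2 ^ (k + 1) - 1 : Int),
       (if k = 0 then 2 else 2 ^ (k + 1) - 1 : Int)) := by
  induction k with
  | zero => simp
  | succ k ih =>
    have h : ((k + 1 : Nat) : Int) = (k : Int) + 1 := by push_cast; ring
    rw [h, PySem.List.pyRange_one_succ_right (by positivity), List.foldl_append, ih,
        List.range_succ, List.map_append]
    rcases Nat.eq_zero_or_pos k with hk | hk
    · subst hk; simp [pvStep]
    · have hk0 : k ≠ 0 := Nat.pos_iff_ne_zero.mp hk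
      simp only [pvStep, if_neg hk0, if_neg (Nat.succ_ne_zero k), List.map_cons, List.map_nil,
        List.foldl_cons, List.foldl_nil, Prod.mk.injEq]
      refine ⟨by simp, by ring_nf, by ring_nf⟩

theorem pv_map_cast (k : Nat) :
    (PySem.List.pyRange 0 (k : Int) 1).map
        (fun i : Int => if i = 0 then 2 else ((1 : Int) <<< (i + 1).toNat) - 1) =
      (List.range k).map (fun i : Nat => if i = 0 then (2 : Int) else 2 ^ (i + 1) - 1) := by
  rw [PySem.List.pyRange_one]
  simp only [sub_zero, Int.toNat_natCast, List.map_map]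
  refine List.map_congr_left ?_
  intro i _
  simp only [Function.comp, zero_add]
  have : ((i : Int) + 1).toNat = i + 1 := by omega
  rw [this, Int.shiftLeft_eq, one_mul]
  by_cases h : i = 0
  · simp [h]
  · rw [if_neg h, if_neg (by exact_mod_cast h)]

-- ===== VERDICT (by name: the statement is the Claim_ definition above) =====
theorem generate_superincreasing_sequence_spec : Claim_equal_generate_superincreasing_sequence := by
  intro n m _
  unfold Spec_generate_superincreasing_sequence generate_superincreasing_sequence
    generate_superincreasing_sequence_alt
  by_cases hn : n ≤ 0
  · rw [PySem.List.pyRange_one_eq_nil hn]; rfl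
  · have hn : 0 < n := by omega
    have hcast : n = ((n.toNat : Nat) : Int) := by omega
    rw [hcast, pv_map_cast]
    show ((PySem.List.pyRange 0 (n.toNat : Int) 1).foldl pvStep ([], 0, 2)).1 = _
    rw [pv_loop_inv]
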